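-- pv_equiv track=rewrite | github.com/pypi-data/pypi-mirror-27 | packages/filtus/filtus-1.0.5.tar.gz/filtus-1.0.5/filtus/VariantFileReader.py | _splitGeneral
-- ===== SOURCE A (Python) =====
-- def _splitGeneral(h, variants, splitCol, sep):
--     if not variants:
--         return h, variants
--     if splitCol not in h:
--         err = "Something is wrong: Column '%s' to be split, is not among the current column names:\n\n%s" %(splitCol, ', '.join(h))
--         raise RuntimeError(err)
--     ind = h.index(splitCol)
--     counts = set(v[ind].count(sep) for v in variants)
--     maxL = max(counts) + 1
--     if len(counts) == 1:
--         for v in variants: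
--             v[ind:(ind+1)] = v[ind].split(sep)
--     else:
--         for v in variants:
--             s = v[ind].split(sep)
--             if len(s) < maxL: s.extend(['']*(maxL-len(s)))
--             v[ind:(ind+1)] = s
--     h[ind:(ind+1)] = [h[ind]+'_%d' %i for i in range(1, maxL+1)]
--     return h, variants
-- ===== SOURCE B (Python) =====
-- # B: no str.split and no padding step -- the width is fixed first (1 + max
-- # separator count), then each cell is torn into exactly that many fields by
-- # repeated str.partition, which yields '' fields past the end by itself.
-- # Like A, mutates h and variants in place via the same slice assignments.
-- def _splitGeneral(h, variants, splitCol, sep):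
--     if not variants:
--         return h, variants
--     if splitCol not in h:
--         err = "Something is wrong: Column '%s' to be split, is not among the current column names:\n\n%s" % (splitCol, ', '.join(h))
--         raise RuntimeError(err)
--     ind = h.index(splitCol)
--     width = 1 + max(v[ind].count(sep) for v in variants)
--     for v in variants:
--         rest = v[ind]
--         parts = []
--         for _ in range(width - 1):
--             head, _sep, rest = rest.partition(sep)
--             parts.append(head)
--         parts.append(rest)
--         v[ind:(ind+1)] = parts
--     h[ind:(ind+1)] = ['%s_%d' % (splitCol, j) for j in range(1, width + 1)]
--     return h, variants
-- ===== Notes on version B (the rewrite author's own statement) =====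
-- stated objective: alternative
-- what changed: B never calls str.split and has no padding step: it fixes the output width first (1 + max separator count) and then tears each cell into exactly that many fields by repeated str.partition, which produces the trailing '' fields by itself; A splits each cell and pads the short split lists afterwards in a two-branch loop.
import Mathlib
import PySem

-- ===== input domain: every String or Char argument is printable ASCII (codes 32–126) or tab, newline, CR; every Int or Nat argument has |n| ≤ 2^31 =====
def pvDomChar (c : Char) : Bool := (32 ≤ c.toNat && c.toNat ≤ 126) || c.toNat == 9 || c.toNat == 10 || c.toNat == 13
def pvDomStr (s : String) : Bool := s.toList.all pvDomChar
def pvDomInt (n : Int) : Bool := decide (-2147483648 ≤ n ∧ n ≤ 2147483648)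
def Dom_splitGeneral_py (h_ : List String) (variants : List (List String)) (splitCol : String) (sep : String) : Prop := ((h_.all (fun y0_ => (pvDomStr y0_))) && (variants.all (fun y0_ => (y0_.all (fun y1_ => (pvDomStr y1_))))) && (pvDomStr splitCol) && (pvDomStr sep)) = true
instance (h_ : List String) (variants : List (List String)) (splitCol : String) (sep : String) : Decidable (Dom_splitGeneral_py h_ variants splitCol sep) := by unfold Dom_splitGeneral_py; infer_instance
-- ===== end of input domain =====

-- B fixes the output width first (1 + max separator count) and tears each cell into exactly
-- that many fields by repeated str.partition (no str.split, no padding step); A splits each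
-- cell and pads afterwards in a two-branch loop. Both mutate h and variants in place
-- identically; the theorems are about the return value.

-- ===== PORT A =====
def splitGeneral_py (h_ : List String) (variants : List (List String)) (splitCol : String) (sep : String) : List String × List (List String) :=
  if variants = [] then (h_, variants)
  else if h_.contains splitCol = false then (h_, variants)  -- Python raises RuntimeError here; excluded by Pre_
  else
    let ind : Nat := (PySem.List.index? h_ splitCol).getD 0
    let counts : PySem.Set Int :=
      PySem.Set.ofList (variants.map (fun v => (PySem.Str.count ((PySem.List.pyGet? v (ind : Int)).getD "") sep : Int)))
    let maxL : Int := ((PySem.List.max? counts (fun x => x)).getD 0) + 1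
    let newVariants : List (List String) :=
      if counts.length = 1 then
        variants.map (fun v =>
          v.take ind ++ (PySem.Str.split? ((PySem.List.pyGet? v (ind : Int)).getD "") sep).getD [] ++ v.drop (ind + 1))
      else
        variants.map (fun v =>
          let s := (PySem.Str.split? ((PySem.List.pyGet? v (ind : Int)).getD "") sep).getD []
          let s' := if (s.length : Int) < maxL then s ++ List.replicate (maxL - (s.length : Int)).toNat "" else s
          v.take ind ++ s' ++ v.drop (ind + 1))
    let newH : List String :=
      h_.take ind ++ (PySem.List.pyRange 1 (maxL + 1) 1).map
        (fun i => ((PySem.List.pyGet? h_ (ind : Int)).getD "") ++ "_" ++ PySem.Int.toStr i) ++ h_.drop (ind + 1)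
    (newH, newVariants)

-- ===== PORT B =====
-- hand port of str.partition via str.find (exact for sep ≠ ''; Python raises ValueError on
-- sep = '', which Pre_ excludes): (before first occurrence, sep, after), or (s, '', '')
def pvPartition (s sep : String) : String × String × String :=
  let i := PySem.Str.find s sep
  if i = -1 then (s, "", "")
  else (String.ofList (s.toList.take i.toNat), sep, String.ofList (s.toList.drop (i.toNat + sep.toList.length)))

-- the inner loop of Source B: n partition steps appending the heads, then the final rest
def pvFields (sep : String) : Nat → String → List String
  | 0, rest => [rest]
  | n + 1, rest =>
      let p := pvPartition rest sep
      p.1 :: pvFields sep n p.2.2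

def splitGeneral_py_alt (h_ : List String) (variants : List (List String)) (splitCol : String) (sep : String) : List String × List (List String) :=
  if variants = [] then (h_, variants)
  else if h_.contains splitCol = false then (h_, variants)  -- same RuntimeError guard as A; excluded by Pre_
  else
    let ind : Nat := (PySem.List.index? h_ splitCol).getD 0
    let width : Int :=
      1 + (PySem.List.max? (variants.map (fun v => (PySem.Str.count ((PySem.List.pyGet? v (ind : Int)).getD "") sep : Int))) (fun x => x)).getD 0
    let newVariants : List (List String) :=
      variants.map (fun v =>
        v.take ind ++ pvFields sep (width - 1).toNat ((PySem.List.pyGet? v (ind : Int)).getD "") ++ v.drop (ind + 1))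
    let newH : List String :=
      h_.take ind ++ (PySem.List.pyRange 1 (width + 1) 1).map
        (fun i => splitCol ++ "_" ++ PySem.Int.toStr i) ++ h_.drop (ind + 1)
    (newH, newVariants)

-- ===== PRECONDITION & SPEC =====
-- Pre_ excludes exactly the inputs where A raises: splitCol missing from h (RuntimeError),
-- sep = '' (ValueError from str.split('')), and rows too short for the column index (IndexError).
def Pre_splitGeneral_py (h_ : List String) (variants : List (List String)) (splitCol : String) (sep : String) : Prop :=
  variants = [] ∨ (splitCol ∈ h_ ∧ sep ≠ "" ∧ ∀ v ∈ variants, (PySem.List.index? h_ splitCol).getD 0 < v.length)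
instance (h_ : List String) (variants : List (List String)) (splitCol : String) (sep : String) : Decidable (Pre_splitGeneral_py h_ variants splitCol sep) := by unfold Pre_splitGeneral_py; infer_instance

def pvWitness_splitGeneral_py : List String × List (List String) × String × String :=
  (["id", "c"], [["7", "a,b"], ["8", "x"]], "c", ",")

def Spec_splitGeneral_py (h_ : List String) (variants : List (List String)) (splitCol : String) (sep : String) (out : List String × List (List String)) : Prop := out = splitGeneral_py_alt h_ variants splitCol sep
instance (h_ : List String) (variants : List (List String)) (splitCol : String) (sep : String) (out : List String × List (List String)) : Decidable (Spec_splitGeneral_py h_ variants splitCol sep out) := by unfold Spec_splitGeneral_py; infer_instance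

-- ===== CLAIM (what is proved, stated in full; the proofs are below) =====
def Claim_equal_splitGeneral_py : Prop := ∀ (h_ : List String) (variants : List (List String)) (splitCol : String) (sep : String), Dom_splitGeneral_py h_ variants splitCol sep → Pre_splitGeneral_py h_ variants splitCol sep → Spec_splitGeneral_py h_ variants splitCol sep (splitGeneral_py h_ variants splitCol sep)

-- ===== LEMMAS AND PROOFS =====

-- ---- facts about PySem.Chars.count.go (for len(split) = count + 1) ----
theorem pv_cg_nil (sub : List Char) (f acc : Nat) : PySem.Chars.count.go sub f [] acc = acc := by
  cases f <;> simp [PySem.Chars.count.go]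

theorem pv_cg_acc (sub : List Char) : ∀ (f : Nat) (l : List Char) (acc : Nat),
    PySem.Chars.count.go sub f l acc = acc + PySem.Chars.count.go sub f l 0 := by
  intro f
  induction f with
  | zero => intro l acc; simp [PySem.Chars.count.go]
  | succ n ih =>
    intro l acc
    cases l with
    | nil => simp [pv_cg_nil]
    | cons c t =>
      simp only [PySem.Chars.count.go]
      split
      · rw [ih _ (acc+1), ih _ 1]; omega
      · exact ih _ acc

theorem pv_len_pos (sub : List Char) (hsub : sub ≠ []) : 1 ≤ sub.length := by
  cases sub with
  | nil => exact absurd rfl hsub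
  | cons a b => simp

theorem pv_cg_fuel (sub : List Char) (hsub : sub ≠ []) : ∀ (f1 f2 : Nat) (l : List Char),
    l.length ≤ f1 → l.length ≤ f2 → PySem.Chars.count.go sub f1 l 0 = PySem.Chars.count.go sub f2 l 0 := by
  have hs1 : 1 ≤ sub.length := pv_len_pos sub hsub
  intro f1
  induction f1 with
  | zero => intro f2 l h1 h2
            have : l = [] := List.eq_nil_of_length_eq_zero (Nat.le_zero.mp h1)
            subst this; simp [pv_cg_nil]
  | succ n ih =>
    intro f2 l h1 h2
    cases l with
    | nil => simp [pv_cg_nil]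
    | cons c t =>
      cases f2 with
      | zero => simp at h2
      | succ m =>
        simp only [List.length_cons] at h1 h2
        simp only [PySem.Chars.count.go]
        split
        · rw [pv_cg_acc _ n _ 1, pv_cg_acc _ m _ 1]
          congr 1
          exact ih _ _ (by simp [List.length_drop]; omega) (by simp [List.length_drop]; omega)
        · exact ih _ _ (by omega) (by omega)

theorem pv_sg_len (sep : List Char) (hsep : sep ≠ []) : ∀ (fuel : Nat) (l cur : List Char) (acc : List (List Char)),
    l.length < fuel →
    (PySem.Chars.splitOn.go sep fuel l cur acc).length = acc.length + 1 + PySem.Chars.count.go sep l.length l 0 := by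
  have hs1 : 1 ≤ sep.length := pv_len_pos sep hsep
  intro fuel
  induction fuel with
  | zero => intro l cur acc h; omega
  | succ n ih =>
    intro l cur acc h
    cases l with
    | nil => simp [PySem.Chars.splitOn.go, pv_cg_nil]
    | cons c t =>
      simp only [List.length_cons] at h
      simp only [PySem.Chars.splitOn.go]
      split
      · rename_i hp
        rw [ih _ _ _ (by simp [List.length_drop]; omega)]
        have key : PySem.Chars.count.go sep (t.length + 1) (c :: t) 0
            = 1 + PySem.Chars.count.go sep (List.drop sep.length (c :: t)).length (List.drop sep.length (c :: t)) 0 := by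
          simp only [PySem.Chars.count.go, hp, if_true]
          rw [pv_cg_acc _ t.length _ 1]
          rw [pv_cg_fuel sep hsep t.length (List.drop sep.length (c :: t)).length _ (by simp [List.length_drop]; omega) le_rfl]
        simp only [List.length_cons]
        simp only [List.length_drop, List.length_cons] at key ⊢
        omega
      · rename_i hp
        rw [ih _ _ _ (by omega)]
        have key : PySem.Chars.count.go sep (t.length + 1) (c :: t) 0
            = PySem.Chars.count.go sep t.length t 0 := by
          simp [PySem.Chars.count.go, hp]
        simp only [List.length_cons, key]

-- len(s.split(sep)) = s.count(sep) + 1 for sep ≠ ''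
theorem pv_length_splitOn_chars (s sep : List Char) (hsep : sep ≠ []) :
    (PySem.Chars.splitOn s sep).length = PySem.Chars.count s sep + 1 := by
  unfold PySem.Chars.splitOn PySem.Chars.count
  rw [pv_sg_len sep hsep (s.length + 1) s [] [] (by omega)]
  have h0 : sep.isEmpty = false := by simp [hsep]
  simp [h0]; omega

-- ---- characterisation of splitOn by first occurrence (for the partition loop of B) ----
theorem pv_no_prefix_of_find_neg (s sep : List Char) (hf : PySem.Chars.find s sep = -1) :
    ∀ j, ¬ sep <+: s.drop j := by
  intro j hp
  exact ((PySem.Chars.find_eq_neg_one_iff s sep).mp hf)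
    ((PySem.Chars.isIn_iff_infix sep s).mp ((PySem.Chars.exists_prefix_drop_iff_isIn sep s).mp ⟨j, hp⟩))

theorem pv_go_noocc (sep : List Char) : ∀ (fuel : Nat) (l : List Char), l.length ≤ fuel →
    (∀ j, ¬ sep <+: l.drop j) → ∀ (cur : List Char) (acc : List (List Char)),
    PySem.Chars.splitOn.go sep fuel l cur acc = acc.reverse ++ [cur.reverse ++ l] := by
  intro fuel
  induction fuel with
  | zero =>
    intro l hl _ cur acc
    have : l = [] := List.eq_nil_of_length_eq_zero (Nat.le_zero.mp hl)
    subst this; simp [PySem.Chars.splitOn.go]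
  | succ n ih =>
    intro l hl hno cur acc
    cases l with
    | nil => simp [PySem.Chars.splitOn.go]
    | cons c t =>
      have hp : sep.isPrefixOf (c :: t) = false := by
        by_contra h
        exact hno 0 (List.isPrefixOf_iff_prefix.mp (by simpa using Bool.of_not_eq_false h))
      simp only [PySem.Chars.splitOn.go, hp, Bool.false_eq_true, if_false]
      rw [ih t (by simp at hl; omega) (fun j => by simpa using hno (j + 1)) (c :: cur) acc]
      simp

theorem pv_go_occ (sep : List Char) (hsep : sep ≠ []) :
    ∀ (j : Nat) (l : List Char), sep <+: l.drop j → (∀ i < j, ¬ sep <+: l.drop i) →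
    ∀ (fuel : Nat), l.length ≤ fuel → ∀ (cur : List Char) (acc : List (List Char)),
    PySem.Chars.splitOn.go sep fuel l cur acc
      = PySem.Chars.splitOn.go sep (fuel - j - 1) (l.drop (j + sep.length)) [] ((cur.reverse ++ l.take j) :: acc) := by
  intro j
  induction j with
  | zero =>
    intro l hpre _ fuel hfuel cur acc
    simp only [List.drop_zero] at hpre
    cases l with
    | nil => cases hsep (List.prefix_nil.mp hpre)
    | cons c t =>
      cases fuel with
      | zero => simp at hfuel
      | succ n =>
        have hp : sep.isPrefixOf (c :: t) = true := List.isPrefixOf_iff_prefix.mpr hpre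
        simp [PySem.Chars.splitOn.go, hp]
  | succ j ih =>
    intro l hpre hmin fuel hfuel cur acc
    cases l with
    | nil => simp at hpre; exact absurd hpre hsep
    | cons c t =>
      cases fuel with
      | zero => simp at hfuel
      | succ n =>
        have hp : sep.isPrefixOf (c :: t) = false := by
          by_contra h
          exact hmin 0 (by omega) (List.isPrefixOf_iff_prefix.mp (by simpa using Bool.of_not_eq_false h))
        simp only [PySem.Chars.splitOn.go, hp, Bool.false_eq_true, if_false]
        rw [ih t (by simpa using hpre) (fun i hi => by simpa using hmin (i + 1) (by omega)) n (by simp at hfuel; omega) (c :: cur) acc]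
        have h1 : n - j - 1 = n + 1 - (j + 1) - 1 := by omega
        have h2 : List.drop (j + sep.length) t = List.drop (j + 1 + sep.length) (c :: t) := by
          have : j + 1 + sep.length = (j + sep.length) + 1 := by omega
          simp [this]
        have h3 : (c :: cur).reverse ++ t.take j = cur.reverse ++ (c :: t).take (j + 1) := by
          simp
        rw [h1, h2, h3]

theorem pv_occ_bound (sep l : List Char) (hsep : sep ≠ []) (j : Nat) (hpre : sep <+: l.drop j) :
    j + sep.length ≤ l.length := by
  have h1 : sep.length ≤ (l.drop j).length := hpre.length_le
  have h2 : (l.drop j).length = l.length - j := by simp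
  have h3 : j ≤ l.length := by
    by_contra h
    have : l.drop j = [] := List.drop_eq_nil_of_le (by omega)
    rw [this] at hpre
    exact hsep (List.prefix_nil.mp hpre)
  omega

theorem pv_splitOn_noocc (s sep : List Char) (hf : PySem.Chars.find s sep = -1) :
    PySem.Chars.splitOn s sep = [s] := by
  unfold PySem.Chars.splitOn
  rw [pv_go_noocc sep (s.length + 1) s (by omega) (pv_no_prefix_of_find_neg s sep hf) [] []]
  simp

-- accumulator/fuel normalisation for splitOn.go (strong induction on the string length)
theorem pv_go_acc (sep : List Char) (hsep : sep ≠ []) : ∀ (N : Nat) (l : List Char), l.length ≤ N →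
    ∀ (fuel : Nat), l.length ≤ fuel → ∀ (acc : List (List Char)),
    PySem.Chars.splitOn.go sep fuel l [] acc
      = acc.reverse ++ PySem.Chars.splitOn.go sep (l.length + 1) l [] [] := by
  have hs1 : 1 ≤ sep.length := pv_len_pos sep hsep
  intro N
  induction N with
  | zero =>
    intro l hl fuel hfuel acc
    have : l = [] := List.eq_nil_of_length_eq_zero (Nat.le_zero.mp hl)
    subst this
    rw [pv_go_noocc sep fuel [] (by simp) (by intro j hp; exact hsep (List.prefix_nil.mp (by simpa using hp))) [] acc,
        pv_go_noocc sep (List.length ([] : List Char) + 1) [] (by simp) (by intro j hp; exact hsep (List.prefix_nil.mp (by simpa using hp))) [] []]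
    simp
  | succ N ih =>
    intro l hl fuel hfuel acc
    by_cases hf : PySem.Chars.find l sep = -1
    · rw [pv_go_noocc sep fuel l hfuel (pv_no_prefix_of_find_neg l sep hf) [] acc,
          pv_go_noocc sep (l.length + 1) l (by omega) (pv_no_prefix_of_find_neg l sep hf) [] []]
      simp
    · have hge : 0 ≤ PySem.Chars.find l sep := by
        have := PySem.Chars.neg_one_le_find l sep; omega
      obtain ⟨hpre, hmin⟩ := PySem.Chars.find_spec hge
      set j := (PySem.Chars.find l sep).toNat with hj
      have hbound : j + sep.length ≤ l.length := pv_occ_bound sep l hsep j hpre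
      have hrl : (l.drop (j + sep.length)).length = l.length - j - sep.length := by simp; omega
      rw [pv_go_occ sep hsep j l hpre hmin fuel hfuel [] acc,
          pv_go_occ sep hsep j l hpre hmin (l.length + 1) (by omega) [] []]
      rw [ih (l.drop (j + sep.length)) (by omega) (fuel - j - 1) (by omega) ((List.reverse [] ++ l.take j) :: acc),
          ih (l.drop (j + sep.length)) (by omega) (l.length + 1 - j - 1) (by omega) ((List.reverse [] ++ l.take j) :: [])]
      simp

theorem pv_splitOn_occ (s sep : List Char) (hsep : sep ≠ []) (hf : PySem.Chars.find s sep ≠ -1) :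
    PySem.Chars.splitOn s sep
      = s.take (PySem.Chars.find s sep).toNat
        :: PySem.Chars.splitOn (s.drop ((PySem.Chars.find s sep).toNat + sep.length)) sep := by
  have hge : 0 ≤ PySem.Chars.find s sep := by
    have := PySem.Chars.neg_one_le_find s sep; omega
  obtain ⟨hpre, hmin⟩ := PySem.Chars.find_spec hge
  set j := (PySem.Chars.find s sep).toNat with hj
  have hbound : j + sep.length ≤ s.length := pv_occ_bound sep s hsep j hpre
  have hs1 : 1 ≤ sep.length := pv_len_pos sep hsep
  conv_lhs => unfold PySem.Chars.splitOn
  rw [pv_go_occ sep hsep j s hpre hmin (s.length + 1) (by omega) [] []]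
  rw [pv_go_acc sep hsep (s.drop (j + sep.length)).length (s.drop (j + sep.length)) le_rfl
      (s.length + 1 - j - 1) (by simp; omega) _]
  unfold PySem.Chars.splitOn
  simp

theorem pv_splitOn_ne_nil (s sep : List Char) (hsep : sep ≠ []) :
    PySem.Chars.splitOn s sep ≠ [] := by
  by_cases hf : PySem.Chars.find s sep = -1
  · rw [pv_splitOn_noocc s sep hf]; simp
  · rw [pv_splitOn_occ s sep hsep hf]; simp

theorem pv_splitOn_nil (sep : List Char) (hsep : sep ≠ []) :
    PySem.Chars.splitOn [] sep = [[]] := by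
  apply pv_splitOn_noocc
  rw [PySem.Chars.find_eq_neg_one_iff]
  intro h
  exact hsep (List.eq_nil_of_infix_nil h)

-- B's partition loop produces exactly splitOn padded with '' to n+1 fields
theorem pv_fields_eq (sep : String) (hsep : sep.toList ≠ []) :
    ∀ (n : Nat) (s : String), (PySem.Chars.splitOn s.toList sep.toList).length ≤ n + 1 →
    pvFields sep n s
      = (PySem.Chars.splitOn s.toList sep.toList).map String.ofList
        ++ List.replicate (n + 1 - (PySem.Chars.splitOn s.toList sep.toList).length) "" := by
  intro n
  induction n with
  | zero =>
    intro s hlen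
    by_cases hf : PySem.Chars.find s.toList sep.toList = -1
    · rw [pv_splitOn_noocc _ _ hf] at hlen ⊢
      simp [pvFields]
    · rw [pv_splitOn_occ _ _ hsep hf] at hlen
      have := pv_splitOn_ne_nil (s.toList.drop ((PySem.Chars.find s.toList sep.toList).toNat + sep.toList.length)) sep.toList hsep
      cases h : PySem.Chars.splitOn (s.toList.drop ((PySem.Chars.find s.toList sep.toList).toNat + sep.toList.length)) sep.toList with
      | nil => exact absurd h this
      | cons a t => rw [h] at hlen; simp at hlen
  | succ n ih =>
    intro s hlen
    by_cases hf : PySem.Chars.find s.toList sep.toList = -1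
    · have hpart : pvPartition s sep = (s, "", "") := by
        simp [pvPartition, PySem.Str.find, hf]
      have hemp : pvFields sep n "" = "" :: List.replicate n "" := by
        have h0 : ("" : String).toList = [] := rfl
        rw [ih ""] <;> rw [h0, pv_splitOn_nil sep.toList hsep]
        · simp
        · simp
      rw [pv_splitOn_noocc _ _ hf]
      show (pvPartition s sep).1 :: pvFields sep n (pvPartition s sep).2.2 = _
      rw [hpart]
      simp [hemp, List.replicate_succ]
    · have hge : 0 ≤ PySem.Chars.find s.toList sep.toList := by
        have := PySem.Chars.neg_one_le_find s.toList sep.toList; omega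
      have hpart : pvPartition s sep
          = (String.ofList (s.toList.take (PySem.Chars.find s.toList sep.toList).toNat), sep,
             String.ofList (s.toList.drop ((PySem.Chars.find s.toList sep.toList).toNat + sep.toList.length))) := by
        simp [pvPartition, PySem.Str.find, hf]
      rw [pv_splitOn_occ _ _ hsep hf] at hlen
      have hlenR : (PySem.Chars.splitOn (s.toList.drop ((PySem.Chars.find s.toList sep.toList).toNat + sep.toList.length)) sep.toList).length ≤ n + 1 := by
        simp only [List.length_cons] at hlen; omega
      have hlist : (String.ofList (s.toList.drop ((PySem.Chars.find s.toList sep.toList).toNat + sep.toList.length))).toList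
          = s.toList.drop ((PySem.Chars.find s.toList sep.toList).toNat + sep.toList.length) := by simp
      have hih := ih (String.ofList (s.toList.drop ((PySem.Chars.find s.toList sep.toList).toNat + sep.toList.length)))
      rw [hlist] at hih
      show (pvPartition s sep).1 :: pvFields sep n (pvPartition s sep).2.2 = _
      rw [hpart]
      rw [pv_splitOn_occ _ _ hsep hf]
      simp only [List.map_cons, List.cons_append, List.length_cons]
      rw [hih hlenR]
      congr 3
      omega

theorem pv_max_spec (l : List Int) (hl : l ≠ []) :
    (PySem.List.max? l (fun x => x)).getD 0 ∈ l ∧ ∀ y ∈ l, y ≤ (PySem.List.max? l (fun x => x)).getD 0 := by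
  cases hm : PySem.List.max? l (fun x => x) with
  | none => exact absurd ((PySem.List.max?_eq_none_iff _ _).mp hm) hl
  | some m =>
    refine ⟨PySem.List.max?_mem hm, ?_⟩
    intro y hy
    exact PySem.List.max?_isMax hm y hy

theorem pv_max_ofList (l : List Int) (hl : l ≠ []) :
    (PySem.List.max? (PySem.Set.ofList l) (fun x => x)).getD 0
      = (PySem.List.max? l (fun x => x)).getD 0 := by
  have hne : (PySem.Set.ofList l : List Int) ≠ [] := by
    cases l with
    | nil => exact absurd rfl hl
    | cons a t =>
      intro h
      have : a ∈ PySem.Set.ofList (a :: t) := (PySem.Set.mem_ofList _ _).mpr (by simp)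
      rw [h] at this; simp at this
  obtain ⟨hmem, hmax⟩ := pv_max_spec l hl
  obtain ⟨hmem', hmax'⟩ := pv_max_spec (PySem.Set.ofList l) hne
  apply le_antisymm
  · exact hmax _ ((PySem.Set.mem_ofList _ _).mp hmem')
  · exact hmax' _ ((PySem.Set.mem_ofList _ _).mpr hmem)

-- ===== VERDICT =====
theorem splitGeneral_py_spec : Claim_equal_splitGeneral_py := by
  unfold Claim_equal_splitGeneral_py
  intro h_ variants splitCol sep _ hpre
  unfold Spec_splitGeneral_py splitGeneral_py splitGeneral_py_alt
  by_cases hv : variants = []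
  · simp [hv]
  · rcases hpre with h0 | ⟨hmem, hsep, hlen⟩
    · exact absurd h0 hv
    have hc : ¬(h_.contains splitCol = false) := by simp; exact hmem
    rw [if_neg hv, if_neg hv, if_neg hc, if_neg hc]
    simp only [Prod.mk.injEq]
    obtain ⟨ind0, hix⟩ : ∃ k, PySem.List.index? h_ splitCol = some k :=
      Option.isSome_iff_exists.mp ((PySem.List.index?_isSome_iff _ _).mpr hmem)
    have hgd : (PySem.List.index? h_ splitCol).getD 0 = ind0 := by rw [hix]; rfl
    obtain ⟨hindlt, hhind, -⟩ := PySem.List.getElem_of_index?_eq_some hix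
    rw [hgd]
    have hsepl : sep.toList ≠ [] := by
      intro h
      exact hsep (by have := congrArg String.ofList h; simpa using this)
    have hne : sep.toList.isEmpty = false := by simp [hsepl]
    have hbridge : ∀ t : String, (PySem.Str.split? t sep).getD []
        = (PySem.Chars.splitOn t.toList sep.toList).map String.ofList := by
      intro t
      simp [PySem.Str.split?, PySem.Chars.split?, hne]
    have hcountdef : ∀ t : String, PySem.Str.count t sep = PySem.Chars.count t.toList sep.toList := by
      intro t; rfl
    have hlensplit : ∀ t : String, ((PySem.Str.split? t sep).getD []).length = PySem.Str.count t sep + 1 := by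
      intro t
      rw [hbridge t, List.length_map, hcountdef t, pv_length_splitOn_chars _ _ hsepl]
    -- the max of the counts (A reads it off the dedup set, B off the plain list)
    have hcs : List.map (fun v => ((PySem.Str.count ((PySem.List.pyGet? v ((ind0 : Nat) : Int)).getD "") sep : Nat) : Int)) variants ≠ [] := by
      simpa using hv
    rw [pv_max_ofList _ hcs]
    obtain ⟨hMmem, hMmax⟩ := pv_max_spec _ hcs
    obtain ⟨v0, -, hMv0⟩ := List.mem_map.mp hMmem
    set M := (PySem.List.max? (List.map (fun v => ((PySem.Str.count ((PySem.List.pyGet? v ((ind0 : Nat) : Int)).getD "") sep : Nat) : Int)) variants) (fun x => x)).getD 0 with hM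
    set m0 : Nat := PySem.Str.count ((PySem.List.pyGet? v0 ((ind0 : Nat) : Int)).getD "") sep with hm0
    have hMm0 : M = (m0 : Int) := hMv0.symm
    have hM1 : (1 : Int) + M - 1 = M := by ring
    have hMt : M.toNat = m0 := by rw [hMm0]; simp
    -- each row: B's partition loop = A's split list plus the padding
    have hrow : ∀ v ∈ variants,
        pvFields sep ((1 + M - 1)).toNat ((PySem.List.pyGet? v ((ind0 : Nat) : Int)).getD "")
          = (PySem.Str.split? ((PySem.List.pyGet? v ((ind0 : Nat) : Int)).getD "") sep).getD []
            ++ List.replicate (m0 - PySem.Str.count ((PySem.List.pyGet? v ((ind0 : Nat) : Int)).getD "") sep) "" := by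
      intro v hvv
      have hle : ((PySem.Str.count ((PySem.List.pyGet? v ((ind0 : Nat) : Int)).getD "") sep : Nat) : Int) ≤ M :=
        hMmax _ (List.mem_map.mpr ⟨v, hvv, rfl⟩)
      have hleN : PySem.Str.count ((PySem.List.pyGet? v ((ind0 : Nat) : Int)).getD "") sep ≤ m0 := by
        rw [hMm0] at hle; exact_mod_cast hle
      have hsl : (PySem.Chars.splitOn ((PySem.List.pyGet? v ((ind0 : Nat) : Int)).getD "").toList sep.toList).length
          = PySem.Str.count ((PySem.List.pyGet? v ((ind0 : Nat) : Int)).getD "") sep + 1 := by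
        rw [hcountdef, pv_length_splitOn_chars _ _ hsepl]
      rw [hM1, hMt]
      rw [pv_fields_eq sep hsepl m0 _ (by rw [hsl]; omega)]
      rw [hbridge, hsl]
      congr 2
      omega
    have hget : (PySem.List.pyGet? h_ ((ind0 : Nat) : Int)).getD "" = splitCol := by
      rw [PySem.List.pyGet?_natCast h_ ind0, List.getElem?_eq_getElem hindlt]
      simpa using hhind
    have hrange : (1 : Int) + M + 1 = M + 1 + 1 := by ring
    refine ⟨by rw [hget, hrange], ?_⟩
    split_ifs with hu
    · -- uniform counts: every count equals m0, B's padding is empty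
      obtain ⟨a, ha⟩ := List.length_eq_one_iff.mp hu
      have hMa : M = a := by
        have := (PySem.Set.mem_ofList _ _).mpr hMmem
        rw [ha] at this; simpa using this
      apply List.map_congr_left
      intro v hvv
      have hva : ((PySem.Str.count ((PySem.List.pyGet? v ((ind0 : Nat) : Int)).getD "") sep : Nat) : Int) = a := by
        have : ((PySem.Str.count ((PySem.List.pyGet? v ((ind0 : Nat) : Int)).getD "") sep : Nat) : Int)
            ∈ PySem.Set.ofList (List.map (fun v => ((PySem.Str.count ((PySem.List.pyGet? v ((ind0 : Nat) : Int)).getD "") sep : Nat) : Int)) variants) :=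
          (PySem.Set.mem_ofList _ _).mpr (List.mem_map.mpr ⟨v, hvv, rfl⟩)
        rw [ha] at this; simpa using this
      have hveq : PySem.Str.count ((PySem.List.pyGet? v ((ind0 : Nat) : Int)).getD "") sep = m0 := by
        have : ((PySem.Str.count ((PySem.List.pyGet? v ((ind0 : Nat) : Int)).getD "") sep : Nat) : Int) = (m0 : Int) := by
          rw [hva, ← hMa, hMm0]
        exact_mod_cast this
      rw [hrow v hvv, hveq]
      simp
    · apply List.map_congr_left
      intro v hvv
      rw [hrow v hvv]
      have hle : ((PySem.Str.count ((PySem.List.pyGet? v ((ind0 : Nat) : Int)).getD "") sep : Nat) : Int) ≤ M :=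
        hMmax _ (List.mem_map.mpr ⟨v, hvv, rfl⟩)
      have hleN : PySem.Str.count ((PySem.List.pyGet? v ((ind0 : Nat) : Int)).getD "") sep ≤ m0 := by
        rw [hMm0] at hle; exact_mod_cast hle
      rw [hlensplit]
      by_cases hlt : (((PySem.Str.count ((PySem.List.pyGet? v ((ind0 : Nat) : Int)).getD "") sep + 1 : Nat) : Int)) < M + 1
      · rw [if_pos hlt]
        have : (M + 1 - ((PySem.Str.count ((PySem.List.pyGet? v ((ind0 : Nat) : Int)).getD "") sep + 1 : Nat) : Int)).toNat
            = m0 - PySem.Str.count ((PySem.List.pyGet? v ((ind0 : Nat) : Int)).getD "") sep := by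
          rw [hMm0]; omega
        rw [this]
      · rw [if_neg hlt]
        have : m0 - PySem.Str.count ((PySem.List.pyGet? v ((ind0 : Nat) : Int)).getD "") sep = 0 := by
          rw [hMm0] at hlt; omega
        rw [this]
        simp
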